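-- pv_equiv track=rewrite | github.com/chimtrangbu/TheShell | completion.py | find_common_suggest
-- ===== SOURCE A (Python) =====
-- def find_common_suggest(suggests, txt):
--     '''
--     Task: + Let max length command is key
--           + Increase index from length of text passed
--           + If some suggest not same then return right away
--     '''
--     index = len(txt)
--     max_command = max(suggests).lower()
--     while index < len(max_command):
--         for e in suggests:
--             if not e.lower().startswith(max_command[:index + 1]):
--                 return max_command[: index]
--         index += 1
--     return txt
-- ===== SOURCE B (Python) =====
-- def find_common_suggest(suggests, txt):
--     # Different decomposition: one pass computing the minimum common-prefix
--     # length m of each lowercased suggestion against the lowercased maximum,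
--     # then a closed-form return instead of A's incrementally grown prefix.
--     ref = max(suggests).lower()
--     m = len(ref)
--     for e in suggests:
--         el = e.lower()
--         k = 0
--         while k < len(el) and k < len(ref) and el[k] == ref[k]:
--             k += 1
--         if k < m:
--             m = k
--     if m >= len(ref) or len(txt) >= len(ref):
--         return txt
--     return ref[:max(m, len(txt))]
-- ===== Notes on version B (the rewrite author's own statement) =====
-- stated objective: alternative
-- what changed: Replaces A's incrementally grown prefix with repeated startswith re-scans by one pass computing the minimum common-prefix length m of each lowercased suggestion against the lowercased maximum, then a closed-form return ref[:max(m,len(txt))] (or txt).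
import Mathlib
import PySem

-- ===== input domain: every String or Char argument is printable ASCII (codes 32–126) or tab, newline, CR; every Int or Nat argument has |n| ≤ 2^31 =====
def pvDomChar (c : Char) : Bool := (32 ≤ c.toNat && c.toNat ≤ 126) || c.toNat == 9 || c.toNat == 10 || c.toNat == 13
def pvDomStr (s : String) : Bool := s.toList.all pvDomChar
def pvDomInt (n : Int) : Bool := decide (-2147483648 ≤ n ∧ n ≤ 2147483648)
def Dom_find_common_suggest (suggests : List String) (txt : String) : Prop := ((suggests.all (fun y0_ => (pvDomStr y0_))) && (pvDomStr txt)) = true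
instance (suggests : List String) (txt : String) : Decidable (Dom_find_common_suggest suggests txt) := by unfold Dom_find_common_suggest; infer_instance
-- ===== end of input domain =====

-- B computes the minimum common-prefix length m in one pass and returns by a
-- closed form, instead of A's incrementally grown prefix with startswith re-scans.

-- ===== PORT A =====
-- the 'while index < len(max_command)' loop; the inner 'for e in suggests: if not …: return'
-- is the existence test 'any' (the returned value does not depend on which e fails).
-- Python's len(s) on a string is its number of code points, i.e. s.toList.length (exact).
def pvLoopA (suggests : List String) (mc : String) (txt : String) (index : Nat) : String :=
  if index < mc.toList.length then
    if suggests.any (fun e =>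
        ! PySem.Str.startswith (PySem.Str.lower e)
            (PySem.Str.slice mc none (some ((index : Int) + 1)))) then
      PySem.Str.slice mc none (some (index : Int))
    else pvLoopA suggests mc txt (index + 1)
  else txt
termination_by mc.toList.length - index
decreasing_by simp only [String.length_toList] at *; omega

def find_common_suggest (suggests : List String) (txt : String) : String :=
  match PySem.List.max? suggests (fun s => s) with
  | none => ""          -- Python raises ValueError on empty suggests; excluded by Pre_
  | some mx => pvLoopA suggests (PySem.Str.lower mx) txt txt.toList.length

-- ===== PORT B =====
-- Source B's inner while loop: common-prefix length of two character lists
def pvLcp : List Char → List Char → Nat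
  | a :: as, b :: bs => if a = b then pvLcp as bs + 1 else 0
  | _, _ => 0

def find_common_suggest_alt (suggests : List String) (txt : String) : String :=
  match PySem.List.max? suggests (fun s => s) with
  | none => ""          -- max([]) raises in B too; excluded by Pre_
  | some mx =>
    let ref := (PySem.Str.lower mx).toList
    let m := suggests.foldl (fun m e => min m (pvLcp (PySem.Str.lower e).toList ref)) ref.length
    if ref.length ≤ m ∨ ref.length ≤ txt.toList.length then txt
    else String.ofList (ref.take (max m txt.toList.length))

-- ===== PRECONDITION & SPEC =====
-- Pre_ excludes only the empty suggestion list, on which Python's max([]) raises ValueError (in A and in B alike).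
def Pre_find_common_suggest (suggests : List String) (txt : String) : Prop := suggests ≠ []
instance (suggests : List String) (txt : String) : Decidable (Pre_find_common_suggest suggests txt) := by unfold Pre_find_common_suggest; infer_instance
def pvWitness_find_common_suggest : List String × String := (["Cat", "cab"], "c")

def Spec_find_common_suggest (suggests : List String) (txt : String) (out : String) : Prop := out = find_common_suggest_alt suggests txt
instance (suggests : List String) (txt : String) (out : String) : Decidable (Spec_find_common_suggest suggests txt out) := by unfold Spec_find_common_suggest; infer_instance

-- ===== CLAIM (what is proved, stated in full; the proofs are below) =====
def Claim_equal_find_common_suggest : Prop := ∀ (suggests : List String) (txt : String), Dom_find_common_suggest suggests txt → Pre_find_common_suggest suggests txt → Spec_find_common_suggest suggests txt (find_common_suggest suggests txt)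

-- ===== LEMMAS AND PROOFS =====

-- take n of ref is a prefix of el iff the common-prefix length reaches n
theorem pvLcp_take_prefix (el ref : List Char) (n : Nat) (hn : n ≤ ref.length) :
    ref.take n <+: el ↔ n ≤ pvLcp el ref := by
  induction n generalizing el ref with
  | zero => simp
  | succ k ih =>
    cases ref with
    | nil => simp at hn
    | cons r rs =>
      cases el with
      | nil => simp [pvLcp, List.take_succ_cons]
      | cons a as =>
        simp only [List.take_succ_cons, List.cons_prefix_cons, pvLcp]
        by_cases hab : a = r
        · subst hab
          simp [ih as rs (Nat.succ_le_succ_iff.mp hn)]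
        · simp [hab, Ne.symm hab]

-- running min of a projection: the fold is ≤ i iff the seed or some element's value is
theorem pvFoldMin_le_iff {α : Type} (l : List α) (f : α → Nat) (init i : Nat) :
    l.foldl (fun m e => min m (f e)) init ≤ i ↔ init ≤ i ∨ ∃ e ∈ l, f e ≤ i := by
  induction l generalizing init with
  | nil => simp
  | cons x xs ih =>
    simp only [List.foldl_cons, ih, min_le_iff, List.mem_cons]
    constructor
    · rintro (⟨h | h⟩ | ⟨e, he, hf⟩)
      · exact Or.inl h
      · exact Or.inr ⟨x, Or.inl rfl, h⟩
      · exact Or.inr ⟨e, Or.inr he, hf⟩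
    · rintro (h | ⟨e, rfl | he, hf⟩)
      · exact Or.inl (Or.inl h)
      · exact Or.inl (Or.inr hf)
      · exact Or.inr ⟨e, he, hf⟩

-- the slice mc[:n] for a natural n, as a String
theorem pvSlice_to_nat (mc : String) (n : Nat) :
    PySem.Str.slice mc none (some (n : Int)) = String.ofList (mc.toList.take n) := by
  apply String.toList_inj.mp
  simp [PySem.Str.toList_slice, PySem.Chars.slice_eq_listSlice, PySem.List.slice_to_natCast]

-- A's inner 'for' fires at index i iff some suggestion's common-prefix length is ≤ i
theorem pvAny_iff (suggests : List String) (mc : String) (i : Nat) (hi : i < mc.toList.length) :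
    (suggests.any (fun e =>
        ! PySem.Str.startswith (PySem.Str.lower e)
            (PySem.Str.slice mc none (some ((i : Int) + 1)))) = true)
      ↔ ∃ e ∈ suggests, pvLcp (PySem.Str.lower e).toList mc.toList ≤ i := by
  have hsl : PySem.Str.slice mc none (some ((i : Int) + 1)) = String.ofList (mc.toList.take (i + 1)) := by
    have : ((i : Int) + 1) = ((i + 1 : Nat) : Int) := by push_cast; ring
    rw [this, pvSlice_to_nat]
  rw [hsl]
  simp only [List.any_eq_true, Bool.not_eq_eq_eq_not, Bool.not_true,
    ← Bool.not_eq_true, PySem.Str.startswith_eq]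
  constructor
  · rintro ⟨e, he, hsw⟩
    refine ⟨e, he, ?_⟩
    have hnp : ¬ (mc.toList.take (i + 1) <+: (PySem.Str.lower e).toList) := by
      intro hp
      exact hsw ((PySem.Chars.startswith_iff _ _).mpr (by simpa using hp))
    have := (pvLcp_take_prefix (PySem.Str.lower e).toList mc.toList (i + 1) (by omega)).not.mp hnp
    omega
  · rintro ⟨e, he, hl⟩
    refine ⟨e, he, ?_⟩
    intro hsw
    have hp := (PySem.Chars.startswith_iff _ _).mp hsw
    have := (pvLcp_take_prefix (PySem.Str.lower e).toList mc.toList (i + 1) (by omega)).mp (by simpa using hp)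
    omega

-- closed form of A's while loop, in terms of B's fold minimum
theorem pvLoopA_closed (suggests : List String) (mc txt : String) (i : Nat) :
    pvLoopA suggests mc txt i =
      (if max i (suggests.foldl (fun m e => min m (pvLcp (PySem.Str.lower e).toList mc.toList)) mc.toList.length)
            < mc.toList.length then
        String.ofList (mc.toList.take (max i (suggests.foldl (fun m e => min m (pvLcp (PySem.Str.lower e).toList mc.toList)) mc.toList.length)))
      else txt) := by
  set M := suggests.foldl (fun m e => min m (pvLcp (PySem.Str.lower e).toList mc.toList)) mc.toList.length with hM
  rw [pvLoopA.eq_def]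
  by_cases hi : i < mc.toList.length
  · rw [if_pos hi]
    by_cases hMi : M ≤ i
    · have hex : ∃ e ∈ suggests, pvLcp (PySem.Str.lower e).toList mc.toList ≤ i := by
        rcases (pvFoldMin_le_iff suggests _ _ i).mp hMi with h | h
        · omega
        · exact h
      rw [if_pos ((pvAny_iff suggests mc i hi).mpr hex), pvSlice_to_nat]
      rw [if_pos (by omega)]
      congr 2
      omega
    · have hnex : ¬ ∃ e ∈ suggests, pvLcp (PySem.Str.lower e).toList mc.toList ≤ i := by
        intro hex
        exact hMi ((pvFoldMin_le_iff suggests _ _ i).mpr (Or.inr hex))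
      have hany : (suggests.any (fun e =>
          ! PySem.Str.startswith (PySem.Str.lower e)
              (PySem.Str.slice mc none (some ((i : Int) + 1)))) = true) → False := by
        intro h; exact hnex ((pvAny_iff suggests mc i hi).mp h)
      rw [if_neg hany, pvLoopA_closed suggests mc txt (i + 1)]
      have : max (i + 1) M = max i M := by omega
      rw [this]
  · rw [if_neg hi, if_neg (by omega)]
termination_by mc.toList.length - i
decreasing_by simp only [String.length_toList] at *; omega

-- ===== VERDICT (by name: the statement is the Claim_ definition above) =====
theorem find_common_suggest_spec : Claim_equal_find_common_suggest := by
  intro suggests txt _ hpre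
  unfold Spec_find_common_suggest find_common_suggest find_common_suggest_alt
  cases hmx : PySem.List.max? suggests (fun s => s) with
  | none => exact absurd ((PySem.List.max?_eq_none_iff suggests _).mp hmx) hpre
  | some mx =>
    simp only
    rw [pvLoopA_closed]
    set ref := (PySem.Str.lower mx).toList
    set M := suggests.foldl (fun m e => min m (pvLcp (PySem.Str.lower e).toList ref)) ref.length
    set t := txt.toList.length
    by_cases h : ref.length ≤ M ∨ ref.length ≤ t
    · rw [if_pos h, if_neg (by omega)]
    · rw [if_neg h, if_pos (by omega)]
      rw [Nat.max_comm]
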